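-- pv_equiv track=rewrite | github.com/onejaejae/learn_datastructure | 자료구조 활용 (스택, 큐, 해쉬, 힙)/18. 같은 숫자는 싫어.py | solution
-- ===== SOURCE A (Python) =====
-- def solution(arr):
--     answer = []
--     i = 0
--     while i < len(arr)-1:
--
--         if arr[i] == arr[i+1]:
--             if arr[i] not in answer:
--                 answer.append(arr[i])
--
--         i+=1
--
--     return answer
-- ===== SOURCE B (Python) =====
-- from itertools import groupby
--
-- def solution(arr):
--     answer = []
--     for value, group in groupby(arr):
--         n = sum(1 for _ in group)
--         if n >= 2 and value not in answer:
--             answer.append(value)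
--     return answer
-- ===== Notes on version B (the rewrite author's own statement) =====
-- stated objective: idiomatic
-- what changed: Replaced the index-based adjacent-pair scan with an itertools.groupby walk over consecutive runs, appending a value when its run length is at least 2 (keeping list-membership dedup).
import Mathlib
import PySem

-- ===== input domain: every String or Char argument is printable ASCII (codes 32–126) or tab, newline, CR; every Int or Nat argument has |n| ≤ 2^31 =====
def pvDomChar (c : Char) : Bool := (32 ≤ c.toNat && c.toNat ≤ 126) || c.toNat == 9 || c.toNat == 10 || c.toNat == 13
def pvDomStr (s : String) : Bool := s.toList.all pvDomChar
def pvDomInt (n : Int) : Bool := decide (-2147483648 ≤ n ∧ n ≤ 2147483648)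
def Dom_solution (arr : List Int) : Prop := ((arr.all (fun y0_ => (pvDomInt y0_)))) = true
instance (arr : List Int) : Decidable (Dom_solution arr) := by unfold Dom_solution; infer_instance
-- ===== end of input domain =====

-- B replaces A's index-based adjacent-pair scan by a groupby-style walk over
-- consecutive runs of equal values (idiomatic; same output, list-membership dedup kept).

-- ===== PORT A =====
-- A's while-loop over indices i < len(arr)-1, comparing arr[i] with arr[i+1].
def solutionGo (arr : List Int) (i : Nat) (answer : List Int) : List Int :=
  if _h : i < arr.length - 1 then
    solutionGo arr (i + 1)
      (if arr.getD i 0 = arr.getD (i + 1) 0 ∧ arr.getD i 0 ∉ answer then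
        answer ++ [arr.getD i 0]
      else answer)
  else answer
termination_by arr.length - 1 - i

def solution (arr : List Int) : List Int := solutionGo arr 0 []

-- ===== PORT B =====
-- B walks consecutive runs (value, run length n); appends value when n ≥ 2 and not yet present.
def runsGo (v : Int) (n : Nat) (rest : List Int) (answer : List Int) : List Int :=
  match rest with
  | [] => if 2 ≤ n ∧ v ∉ answer then answer ++ [v] else answer
  | x :: xs =>
      if x = v then runsGo v (n + 1) xs answer
      else runsGo x 1 xs (if 2 ≤ n ∧ v ∉ answer then answer ++ [v] else answer)

def solution_alt (arr : List Int) : List Int :=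
  match arr with
  | [] => []
  | x :: xs => runsGo x 1 xs []

-- ===== PRECONDITION & SPEC =====
def Spec_solution (arr : List Int) (out : List Int) : Prop := out = solution_alt arr
instance (arr : List Int) (out : List Int) : Decidable (Spec_solution arr out) := by unfold Spec_solution; infer_instance

-- ===== CLAIM (what is proved, stated in full; the proofs are below) =====
def Claim_equal_solution : Prop := ∀ (arr : List Int), Dom_solution arr → Spec_solution arr (solution arr)

-- ===== LEMMAS AND PROOFS =====

-- A's loop, rewritten structurally: fold over adjacent pairs of the suffix.
def pairFold : List Int → List Int → List Int
  | x :: y :: rest, ans =>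
      pairFold (y :: rest) (if x = y ∧ x ∉ ans then ans ++ [x] else ans)
  | _, ans => ans

def stepB (v : Int) (ans : List Int) : List Int :=
  if v ∉ ans then ans ++ [v] else ans

lemma pairFold_single (x : Int) (ans : List Int) : pairFold [x] ans = ans := rfl

lemma solutionGo_eq_pairFold (arr : List Int) (i : Nat) (ans : List Int) :
    solutionGo arr i ans = pairFold (arr.drop i) ans := by
  induction i, ans using solutionGo.induct arr with
  | case1 i ans h ih =>
      rw [solutionGo, dif_pos h]
      simp only [dite_eq_ite] at ih
      rw [ih]
      have h1 : i < arr.length := by omega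
      have h2 : i + 1 < arr.length := by omega
      rw [List.drop_eq_getElem_cons h1, List.drop_eq_getElem_cons h2]
      simp only [pairFold, List.getD_eq_getElem _ _ h1, List.getD_eq_getElem _ _ h2]
  | case2 i ans h =>
      rw [solutionGo, dif_neg h]
      have : arr.length ≤ i + 1 := by omega
      rcases e : arr.drop i with _ | ⟨x, l⟩
      · rfl
      · have : (arr.drop i).length ≤ 1 := by simp; omega
        rw [e] at this
        rcases l with _ | ⟨y, l⟩
        · rfl
        · simp at this

lemma key (xs : List Int) : ∀ (x : Int) (ans : List Int) (n : Nat),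
    (n = 1 → pairFold (x :: xs) ans = runsGo x n xs ans) ∧
    (2 ≤ n → pairFold (x :: xs) (stepB x ans) = runsGo x n xs ans) := by
  induction xs with
  | nil =>
      intro x ans n
      constructor
      · rintro rfl
        simp [pairFold_single, runsGo]
      · intro hn
        simp only [pairFold_single, runsGo, stepB]
        split_ifs with h1 h2 h2 <;> first | rfl | (exfalso; tauto)
  | cons y ys ih =>
      intro x ans n
      have memstep : x ∈ stepB x ans := by
        by_cases h : x ∈ ans <;> simp [stepB, h]
      constructor
      · rintro rfl
        by_cases hxy : y = x
        · subst hxy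
          show pairFold (y :: y :: ys) ans = runsGo y 1 (y :: ys) ans
          rw [runsGo, if_pos rfl]
          have := (ih y ans 2).2 (le_refl 2)
          rw [← this]
          simp only [pairFold]
          congr 1
          unfold stepB
          split_ifs with h1 h2 h2 <;> first | rfl | (exfalso; tauto)
        · show pairFold (x :: y :: ys) ans = runsGo x 1 (y :: ys) ans
          rw [runsGo, if_neg hxy]
          have hb : ¬ (2 ≤ (1:Nat) ∧ x ∉ ans) := by omega
          rw [if_neg hb]
          have := (ih y ans 1).1 rfl
          rw [← this]
          simp only [pairFold]
          rw [if_neg (by tauto)]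
      · intro hn
        by_cases hxy : y = x
        · subst hxy
          show pairFold (y :: y :: ys) (stepB y ans) = runsGo y n (y :: ys) ans
          rw [runsGo, if_pos rfl]
          have := (ih y ans (n + 1)).2 (by omega)
          rw [← this]
          simp only [pairFold]
          rw [if_neg (by tauto)]
        · show pairFold (x :: y :: ys) (stepB x ans) = runsGo x n (y :: ys) ans
          rw [runsGo, if_neg hxy]
          have heq : (if 2 ≤ n ∧ x ∉ ans then ans ++ [x] else ans) = stepB x ans := by
            unfold stepB
            split_ifs with h1 h2 h2 <;> first | rfl | (exfalso; tauto)
          rw [heq]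
          have := (ih y (stepB x ans) 1).1 rfl
          rw [← this]
          simp only [pairFold]
          rw [if_neg (by tauto)]

lemma pairFold_eq_runs (arr : List Int) (ans : List Int) :
    pairFold arr ans = (match arr with | [] => ans | x :: xs => runsGo x 1 xs ans) := by
  cases arr with
  | nil => rfl
  | cons x xs => exact (key xs x ans 1).1 rfl

-- ===== VERDICT (by name: the statement is the Claim_ definition above) =====
theorem solution_spec : Claim_equal_solution := by
  intro arr _
  unfold Spec_solution solution solution_alt
  rw [solutionGo_eq_pairFold, List.drop_zero, pairFold_eq_runs]
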